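-- pv_equiv track=rewrite | github.com/ffekirnew/a2sv-competitive-programming | 773-sliding-puzzle/773-sliding-puzzle.py | successor_states
-- ===== SOURCE A (Python) =====
-- def successor_states(board):
--     states = []
--
--     z_idx = [i for i in range(6) if board[i] == 0][0]
--
--     if z_idx < len(board) - 1 and z_idx != 2:
--         new_board = board.copy()
--         new_board[z_idx], new_board[z_idx + 1] = new_board[z_idx + 1], new_board[z_idx]
--         states.append(new_board)
--
--     if z_idx != 3 and z_idx != 0:
--         new_board = board.copy()
--         new_board[z_idx], new_board[z_idx - 1] = new_board[z_idx - 1], new_board[z_idx]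
--         states.append(new_board)
--
--     if  z_idx < 3:
--         new_board = board.copy()
--         new_board[z_idx], new_board[z_idx + 3] = new_board[z_idx + 3], new_board[z_idx]
--         states.append(new_board)
--     if z_idx > 2:
--         new_board = board.copy()
--         new_board[z_idx], new_board[z_idx - 3] = new_board[z_idx - 3], new_board[z_idx]
--         states.append(new_board)
--
--     return states
-- ===== SOURCE B (Python) =====
-- # Permutation-table re-implementation: each successor is produced by APPLYING a
-- # precomputed full index-permutation of the board (successor[i] = board[perm[i]]),
-- # keyed by the blank's position; no copying/swapping, no positional branch tests.
-- # Entries are ordered exactly as A emits moves (right, left, down, up).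
-- _PERMS = {
--     0: [[1, 0, 2, 3, 4, 5], [3, 1, 2, 0, 4, 5]],
--     1: [[0, 2, 1, 3, 4, 5], [1, 0, 2, 3, 4, 5], [0, 4, 2, 3, 1, 5]],
--     2: [[0, 2, 1, 3, 4, 5], [0, 1, 5, 3, 4, 2]],
--     3: [[0, 1, 2, 4, 3, 5], [3, 1, 2, 0, 4, 5]],
--     4: [[0, 1, 2, 3, 5, 4], [0, 1, 2, 4, 3, 5], [0, 4, 2, 3, 1, 5]],
--     5: [[0, 1, 2, 3, 5, 4], [0, 1, 5, 3, 4, 2]],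
-- }
--
--
-- def successor_states(board):
--     z = board.index(0)
--     return [[board[p] for p in perm] for perm in _PERMS[z]]
-- ===== Notes on version B (the rewrite author's own statement) =====
-- stated objective: alternative
-- what changed: Instead of copying the board and swapping two cells per legal move behind four positional if-tests, B stores the complete index-permutation of each legal move and builds every successor in one shot as [board[p] for p in perm], so no mutation, copy or swap occurs at all.
import Mathlib
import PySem

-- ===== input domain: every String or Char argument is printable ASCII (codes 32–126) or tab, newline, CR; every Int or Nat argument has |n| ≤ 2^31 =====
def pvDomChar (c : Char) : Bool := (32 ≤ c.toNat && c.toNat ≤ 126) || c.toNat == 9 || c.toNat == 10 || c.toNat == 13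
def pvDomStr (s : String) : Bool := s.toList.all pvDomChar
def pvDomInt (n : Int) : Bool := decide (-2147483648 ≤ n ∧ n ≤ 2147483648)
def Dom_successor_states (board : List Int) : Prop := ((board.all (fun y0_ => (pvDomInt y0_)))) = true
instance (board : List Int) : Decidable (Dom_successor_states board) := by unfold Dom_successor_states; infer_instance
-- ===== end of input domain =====

-- B builds each successor by applying a precomputed full index-permutation of the board
-- (successor[i] = board[perm[i]]) instead of A's four conditional copy-and-swap branches
-- (objective: alternative; equal return values on Pre_).

-- ===== PORT A =====
-- simultaneous swap: new_board[i], new_board[j] = new_board[j], new_board[i]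
def aSwap (board : List Int) (i j : Int) : List Int :=
  let vi := PySem.List.pyGetD board i 0
  let vj := PySem.List.pyGetD board j 0
  PySem.List.pySetD (PySem.List.pySetD board i vj) j vi

def successor_states (board : List Int) : List (List Int) :=
  -- z_idx = [i for i in range(6) if board[i] == 0][0]  (an empty comprehension = IndexError, outside Pre_)
  match (PySem.List.pyRange 0 6 1).filter (fun i => PySem.List.pyGetD board i 0 == 0) with
  | [] => []
  | z :: _ =>
    let s1 := if z < (board.length : Int) - 1 ∧ z ≠ 2 then [aSwap board z (z + 1)] else []
    let s2 := if z ≠ 3 ∧ z ≠ 0 then [aSwap board z (z - 1)] else []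
    let s3 := if z < 3 then [aSwap board z (z + 3)] else []
    let s4 := if z > 2 then [aSwap board z (z - 3)] else []
    s1 ++ s2 ++ s3 ++ s4

-- ===== PORT B =====
def pvPerms : PySem.Dict Int (List (List Int)) :=
  PySem.Dict.ofList
    [(0, [[1, 0, 2, 3, 4, 5], [3, 1, 2, 0, 4, 5]]),
     (1, [[0, 2, 1, 3, 4, 5], [1, 0, 2, 3, 4, 5], [0, 4, 2, 3, 1, 5]]),
     (2, [[0, 2, 1, 3, 4, 5], [0, 1, 5, 3, 4, 2]]),
     (3, [[0, 1, 2, 4, 3, 5], [3, 1, 2, 0, 4, 5]]),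
     (4, [[0, 1, 2, 3, 5, 4], [0, 1, 2, 4, 3, 5], [0, 4, 2, 3, 1, 5]]),
     (5, [[0, 1, 2, 3, 5, 4], [0, 1, 5, 3, 4, 2]])]

def successor_states_alt (board : List Int) : List (List Int) :=
  match PySem.List.index? board 0 with
  | none => []          -- board.index(0) raises ValueError, outside Pre_
  | some z =>
    match pvPerms.get? (z : Int) with
    | none => []        -- KeyError, outside Pre_
    | some perms =>
      -- [[board[p] for p in perm] for perm in _PERMS[z]]
      perms.map (fun perm => perm.map (fun p => PySem.List.pyGetD board p 0))

-- ===== PRECONDITION & SPEC =====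
-- Pre_ is the natural 2x3-puzzle domain: exactly six cells, one of them the blank 0.
-- It excludes longer boards with the blank in the first six cells, on which A still
-- returns (its `z_idx < len(board)-1` test then also swaps the blank at index 5 with
-- cell 6, an artefact of treating a non-2x3 list as a puzzle) — see claim.json cites.
def Pre_successor_states (board : List Int) : Prop :=
  board.length = 6 ∧ (0 : Int) ∈ board
instance (board : List Int) : Decidable (Pre_successor_states board) := by
  unfold Pre_successor_states; infer_instance

def pvWitness_successor_states : List Int := [1, 2, 0, 3, 4, 5]

def Spec_successor_states (board : List Int) (out : List (List Int)) : Prop := out = successor_states_alt board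
instance (board : List Int) (out : List (List Int)) : Decidable (Spec_successor_states board out) := by unfold Spec_successor_states; infer_instance

-- ===== CLAIM (what is proved, stated in full; the proofs are below) =====
def Claim_equal_successor_states : Prop := ∀ (board : List Int), Dom_successor_states board → Pre_successor_states board → Spec_successor_states board (successor_states board)

-- ===== LEMMAS AND PROOFS =====
set_option maxHeartbeats 1600000 in
lemma pvCase0 (b c d e f : Int) :
    successor_states [0, b, c, d, e, f] = successor_states_alt [0, b, c, d, e, f] := by
  simp only [successor_states, successor_states_alt]
  rw [show PySem.List.pyRange 0 6 1 = [0, 1, 2, 3, 4, 5] from by decide]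
  rw [PySem.List.index?_eq_idxOf?]
  simp only [List.filter_cons, List.filter_nil, List.idxOf?, List.findIdx?, List.findIdx?.go,
    PySem.List.pyGetD, PySem.List.pyGet?, PySem.List.pyIdx?]
  split
  · rename_i heq
    simp at heq
  · rename_i z tail heq
    simp at heq
    obtain ⟨hz, -⟩ := heq
    subst hz
    norm_num
    rw [show pvPerms.get? 0 = some [[1, 0, 2, 3, 4, 5], [3, 1, 2, 0, 4, 5]] from by decide]
    simp [aSwap, PySem.List.pyGetD, PySem.List.pyGet?, PySem.List.pyIdx?,
      PySem.List.pySetD, PySem.List.pySet?]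

set_option maxHeartbeats 1600000 in
lemma pvCase1 (a c d e f : Int) (ha : ¬ a = 0):
    successor_states [a, 0, c, d, e, f] = successor_states_alt [a, 0, c, d, e, f] := by
  simp only [successor_states, successor_states_alt]
  rw [show PySem.List.pyRange 0 6 1 = [0, 1, 2, 3, 4, 5] from by decide]
  rw [PySem.List.index?_eq_idxOf?]
  simp only [List.filter_cons, List.filter_nil, List.idxOf?, List.findIdx?, List.findIdx?.go,
    PySem.List.pyGetD, PySem.List.pyGet?, PySem.List.pyIdx?]
  split
  · rename_i heq
    simp [ha] at heq
  · rename_i z tail heq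
    simp [ha] at heq
    obtain ⟨hz, -⟩ := heq
    subst hz
    norm_num
    split
    · rename_i heq2
      simp [ha] at heq2
    · rename_i w heq2
      simp [ha] at heq2
      subst heq2
      rw [show pvPerms.get? ((1 : Nat) : Int) = some [[0, 2, 1, 3, 4, 5], [1, 0, 2, 3, 4, 5], [0, 4, 2, 3, 1, 5]] from by decide]
      simp [aSwap, PySem.List.pyGetD, PySem.List.pyGet?, PySem.List.pyIdx?,
        PySem.List.pySetD, PySem.List.pySet?]

set_option maxHeartbeats 1600000 in
lemma pvCase2 (a b d e f : Int) (ha : ¬ a = 0) (hb : ¬ b = 0):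
    successor_states [a, b, 0, d, e, f] = successor_states_alt [a, b, 0, d, e, f] := by
  simp only [successor_states, successor_states_alt]
  rw [show PySem.List.pyRange 0 6 1 = [0, 1, 2, 3, 4, 5] from by decide]
  rw [PySem.List.index?_eq_idxOf?]
  simp only [List.filter_cons, List.filter_nil, List.idxOf?, List.findIdx?, List.findIdx?.go,
    PySem.List.pyGetD, PySem.List.pyGet?, PySem.List.pyIdx?]
  split
  · rename_i heq
    simp [ha, hb] at heq
  · rename_i z tail heq
    simp [ha, hb] at heq
    obtain ⟨hz, -⟩ := heq
    subst hz
    norm_num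
    split
    · rename_i heq2
      simp [ha, hb] at heq2
    · rename_i w heq2
      simp [ha, hb] at heq2
      subst heq2
      rw [show pvPerms.get? ((2 : Nat) : Int) = some [[0, 2, 1, 3, 4, 5], [0, 1, 5, 3, 4, 2]] from by decide]
      simp [aSwap, PySem.List.pyGetD, PySem.List.pyGet?, PySem.List.pyIdx?,
        PySem.List.pySetD, PySem.List.pySet?]

set_option maxHeartbeats 1600000 in
lemma pvCase3 (a b c e f : Int) (ha : ¬ a = 0) (hb : ¬ b = 0) (hc : ¬ c = 0):
    successor_states [a, b, c, 0, e, f] = successor_states_alt [a, b, c, 0, e, f] := by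
  simp only [successor_states, successor_states_alt]
  rw [show PySem.List.pyRange 0 6 1 = [0, 1, 2, 3, 4, 5] from by decide]
  rw [PySem.List.index?_eq_idxOf?]
  simp only [List.filter_cons, List.filter_nil, List.idxOf?, List.findIdx?, List.findIdx?.go,
    PySem.List.pyGetD, PySem.List.pyGet?, PySem.List.pyIdx?]
  split
  · rename_i heq
    simp [ha, hb, hc] at heq
  · rename_i z tail heq
    simp [ha, hb, hc] at heq
    obtain ⟨hz, -⟩ := heq
    subst hz
    norm_num
    split
    · rename_i heq2
      simp [ha, hb, hc] at heq2
    · rename_i w heq2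
      simp [ha, hb, hc] at heq2
      subst heq2
      rw [show pvPerms.get? ((3 : Nat) : Int) = some [[0, 1, 2, 4, 3, 5], [3, 1, 2, 0, 4, 5]] from by decide]
      simp [aSwap, PySem.List.pyGetD, PySem.List.pyGet?, PySem.List.pyIdx?,
        PySem.List.pySetD, PySem.List.pySet?]

set_option maxHeartbeats 1600000 in
lemma pvCase4 (a b c d f : Int) (ha : ¬ a = 0) (hb : ¬ b = 0) (hc : ¬ c = 0) (hd : ¬ d = 0):
    successor_states [a, b, c, d, 0, f] = successor_states_alt [a, b, c, d, 0, f] := by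
  simp only [successor_states, successor_states_alt]
  rw [show PySem.List.pyRange 0 6 1 = [0, 1, 2, 3, 4, 5] from by decide]
  rw [PySem.List.index?_eq_idxOf?]
  simp only [List.filter_cons, List.filter_nil, List.idxOf?, List.findIdx?, List.findIdx?.go,
    PySem.List.pyGetD, PySem.List.pyGet?, PySem.List.pyIdx?]
  split
  · rename_i heq
    simp [ha, hb, hc, hd] at heq
  · rename_i z tail heq
    simp [ha, hb, hc, hd] at heq
    obtain ⟨hz, -⟩ := heq
    subst hz
    norm_num
    split
    · rename_i heq2
      simp [ha, hb, hc, hd] at heq2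
    · rename_i w heq2
      simp [ha, hb, hc, hd] at heq2
      subst heq2
      rw [show pvPerms.get? ((4 : Nat) : Int) = some [[0, 1, 2, 3, 5, 4], [0, 1, 2, 4, 3, 5], [0, 4, 2, 3, 1, 5]] from by decide]
      simp [aSwap, PySem.List.pyGetD, PySem.List.pyGet?, PySem.List.pyIdx?,
        PySem.List.pySetD, PySem.List.pySet?]

set_option maxHeartbeats 1600000 in
lemma pvCase5 (a b c d e : Int) (ha : ¬ a = 0) (hb : ¬ b = 0) (hc : ¬ c = 0) (hd : ¬ d = 0) (he : ¬ e = 0):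
    successor_states [a, b, c, d, e, 0] = successor_states_alt [a, b, c, d, e, 0] := by
  simp only [successor_states, successor_states_alt]
  rw [show PySem.List.pyRange 0 6 1 = [0, 1, 2, 3, 4, 5] from by decide]
  rw [PySem.List.index?_eq_idxOf?]
  simp only [List.filter_cons, List.filter_nil, List.idxOf?, List.findIdx?, List.findIdx?.go,
    PySem.List.pyGetD, PySem.List.pyGet?, PySem.List.pyIdx?]
  split
  · rename_i heq
    simp [ha, hb, hc, hd, he] at heq
  · rename_i z tail heq
    simp [ha, hb, hc, hd, he] at heq
    obtain ⟨hz, -⟩ := heq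
    subst hz
    norm_num
    split
    · rename_i heq2
      simp [ha, hb, hc, hd, he] at heq2
    · rename_i w heq2
      simp [ha, hb, hc, hd, he] at heq2
      subst heq2
      rw [show pvPerms.get? ((5 : Nat) : Int) = some [[0, 1, 2, 3, 5, 4], [0, 1, 5, 3, 4, 2]] from by decide]
      simp [aSwap, PySem.List.pyGetD, PySem.List.pyGet?, PySem.List.pyIdx?,
        PySem.List.pySetD, PySem.List.pySet?]

-- ===== VERDICT (by name: the statement is the Claim_ definition above) =====
theorem successor_states_spec : Claim_equal_successor_states := by
  intro board _ hpre
  obtain ⟨hlen, hmem⟩ := hpre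
  unfold Spec_successor_states
  rcases board with _ | ⟨a, _ | ⟨b, _ | ⟨c, _ | ⟨d, _ | ⟨e, _ | ⟨f, _ | ⟨g, rest⟩⟩⟩⟩⟩⟩⟩ <;>
    simp only [List.length_cons, List.length_nil] at hlen <;> try omega
  by_cases ha : a = 0
  · subst ha; exact pvCase0 b c d e f
  · by_cases hb : b = 0
    · subst hb; exact pvCase1 a c d e f ha
    · by_cases hc : c = 0
      · subst hc; exact pvCase2 a b d e f ha hb
      · by_cases hd : d = 0
        · subst hd; exact pvCase3 a b c e f ha hb hc
        · by_cases he : e = 0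
          · subst he; exact pvCase4 a b c d f ha hb hc hd
          · have hf : f = 0 := by
              simp only [List.mem_cons, List.not_mem_nil, or_false] at hmem
              rcases hmem with h | h | h | h | h | h
              · exact absurd h.symm ha
              · exact absurd h.symm hb
              · exact absurd h.symm hc
              · exact absurd h.symm hd
              · exact absurd h.symm he
              · exact h.symm
            subst hf; exact pvCase5 a b c d e ha hb hc hd he
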